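-- pv_equiv track=rewrite | github.com/Nitro27xd/Proyecto-II-Taller-De-Programacion-GR-21 | Grupo_6.py | byebyelines
-- ===== SOURCE A (Python) =====
-- def byecolum(m,n):
--     colum=len(m)
--     thecolum=[fila[n] for fila in m]
--     borrar=['.' for i in range(colum)]
--     if thecolum == borrar:
--         for fila in m:
-- 	        fila.pop(n)
--     return m
--
-- def chaorow(m,n):
--     row=len(m[0])
--     larow=m[n]
--     borrar=['.' for i in range(row)]
--     if larow == borrar:
--         m.pop(n)
--     return m
--
-- def byebyelines(m):
--     n=0
--     l=len(m)
--     for i in range(len(m)):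
--         m=chaorow(m,n)
--         l2=len(m)
--         if l!=l2:
--             n-=1
--         l=len(m)
--         n+=1
--     a=len(m[0])
--     x=0
--     for j in range(len(m[0])):
--         m=byecolum(m,x)
--         a2=len(m[0])
--         if a!=a2:
--             x-=1
--         a=len(m[0])
--         x+=1
--     return m
-- ===== SOURCE B (Python) =====
-- def byebyelines(m):
--     rows = [r for r in m if any(c != '.' for c in r)]
--     width = len(rows[0])
--     keep = [j for j in range(width) if any(r[j] != '.' for r in rows)]
--     return [[r[j] for j in keep] for r in rows]
-- ===== Notes on version B (the rewrite author's own statement) =====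
-- stated objective: alternative
-- what changed: Replaces the two in-place deletion loops with index bookkeeping (and per-deletion pops shifting every row) by a one-pass filter of non-dot rows plus a precomputed list of kept column indices used to rebuild the grid directly.
-- outside the precondition, e.g. on byebyelines([['a'], ['b', 'x']]): A returns [['a'], ['b', 'x']], B returns [['a'], ['b']]
import Mathlib
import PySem

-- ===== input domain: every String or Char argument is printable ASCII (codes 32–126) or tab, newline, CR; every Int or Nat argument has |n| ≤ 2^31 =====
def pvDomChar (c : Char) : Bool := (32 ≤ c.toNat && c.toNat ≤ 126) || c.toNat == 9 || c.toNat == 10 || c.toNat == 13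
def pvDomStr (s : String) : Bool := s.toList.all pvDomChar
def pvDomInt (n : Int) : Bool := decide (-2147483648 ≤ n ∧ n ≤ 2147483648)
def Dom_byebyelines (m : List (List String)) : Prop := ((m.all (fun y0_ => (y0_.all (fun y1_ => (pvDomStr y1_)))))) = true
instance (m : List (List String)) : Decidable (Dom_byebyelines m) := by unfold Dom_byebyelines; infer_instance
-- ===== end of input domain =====

-- B removes all-dot rows, then all-dot columns, by filtering rows once and rebuilding from a
-- precomputed list of kept column indices instead of A's deletion loops with in-place pops and
-- index bookkeeping (objective: alternative algorithm). A mutates its argument in place; B does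
-- not — the equivalence proved here is about the return value only.

-- ===== PORT A =====
def chaorowA (m : List (List String)) (n : Int) : List (List String) :=
  let row := (m.headD []).length
  let larow := (PySem.List.pyGet? m n).getD []
  let borrar := (List.range row).map (fun _ => ".")
  if larow = borrar then ((PySem.List.pop? m n).map Prod.snd).getD m else m

def byecolumA (m : List (List String)) (n : Int) : List (List String) :=
  let colum := m.length
  let thecolum := m.map (fun fila => (PySem.List.pyGet? fila n).getD "")
  let borrar := (List.range colum).map (fun _ => ".")
  if thecolum = borrar then
    m.map (fun fila => ((PySem.List.pop? fila n).map Prod.snd).getD fila)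
  else m

def rowStepA (st : List (List String) × Int × Nat) : List (List String) × Int × Nat :=
  let m' := chaorowA st.1 st.2.1
  let l2 := m'.length
  let n' := if st.2.2 ≠ l2 then st.2.1 - 1 else st.2.1
  (m', n' + 1, m'.length)

def colStepA (st : List (List String) × Int × Nat) : List (List String) × Int × Nat :=
  let m' := byecolumA st.1 st.2.1
  let a2 := (m'.headD []).length
  let x' := if st.2.2 ≠ a2 then st.2.1 - 1 else st.2.1
  (m', x' + 1, a2)

def byebyelines (m : List (List String)) : List (List String) :=
  let s1 := (List.range m.length).foldl (fun st _ => rowStepA st) (m, 0, m.length)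
  let m1 := s1.1
  let s2 := (List.range ((m1.headD []).length)).foldl (fun st _ => colStepA st)
              (m1, 0, (m1.headD []).length)
  s2.1

-- ===== PORT B =====
def byebyelines_alt (m : List (List String)) : List (List String) :=
  let rows := m.filter (fun r => r.any (fun c => c != "."))
  let width := (rows.headD []).length
  let keep := (List.range width).filter (fun j => rows.any (fun r => r.getD j "" != "."))
  rows.map (fun r => keep.map (fun j => r.getD j ""))

-- ===== PRECONDITION & SPEC =====
-- Pre_ excludes grids where A raises IndexError — empty or all-dot grids (m[0] after every row is
-- removed) and ragged grids whose column scan hits a short row — together with the remaining ragged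
-- grids, on which A's survival and returned shape are accidents of which column the scan reaches.
def Pre_byebyelines (m : List (List String)) : Prop :=
  (∀ r ∈ m, r.length = (m.headD []).length) ∧ (∃ r ∈ m, ∃ c ∈ r, c ≠ ".")
instance (m : List (List String)) : Decidable (Pre_byebyelines m) := by
  unfold Pre_byebyelines; infer_instance
def pvWitness_byebyelines : List (List String) := [["a", "."], [".", "."]]
def Spec_byebyelines (m : List (List String)) (out : List (List String)) : Prop := out = byebyelines_alt m
instance (m : List (List String)) (out : List (List String)) : Decidable (Spec_byebyelines m out) := by unfold Spec_byebyelines; infer_instance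

-- ===== CLAIM (what is proved, stated in full; the proofs are below) =====
def Claim_equal_byebyelines : Prop := ∀ (m : List (List String)), Dom_byebyelines m → Pre_byebyelines m → Spec_byebyelines m (byebyelines m)

-- ===== LEMMAS AND PROOFS =====

def keepR (r : List String) : Bool := r.any (fun c => c != ".")
def keepC (g : List (List String)) (j : Nat) : Bool := g.any (fun r => r.getD j "" != ".")
def selPrefix (g : List (List String)) (j : Nat) : List Nat :=
  (List.range j).filter (keepC g)
def curGrid (g : List (List String)) (j : Nat) : List (List String) :=
  g.map (fun r => (selPrefix g j).map (fun c => r.getD c "") ++ r.drop j)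

theorem foldl_const_iterate {α β : Type} (l : List α) (g : β → β) (s : β) :
    l.foldl (fun s _ => g s) s = g^[l.length] s := by
  induction l generalizing s with
  | nil => rfl
  | cons x xs ih => simp [List.foldl_cons, ih, Function.iterate_succ_apply]

theorem range_map_const (n : Nat) :
    (List.range n).map (fun _ => ".") = List.replicate n "." := by
  simp [List.map_const']

theorem eq_replicate_iff_not_keepR (r : List String) (w : Nat) (hw : r.length = w) :
    r = List.replicate w "." ↔ keepR r = false := by
  subst hw
  constructor
  · intro h
    simp [keepR]
    intro c hc
    rw [h] at hc
    exact List.eq_of_mem_replicate hc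
  · intro h
    simp [keepR] at h
    exact List.eq_replicate_of_mem h

theorem map_eq_replicate_iff {α β : Type} (l : List α) (f : α → β) (v : β) :
    l.map f = List.replicate l.length v ↔ ∀ x ∈ l, f x = v := by
  induction l with
  | nil => simp
  | cons x xs ih => simp [List.replicate_succ, ih]

theorem eraseIdx_append_self {α : Type} (pre : List α) (y : α) (ys : List α) :
    (pre ++ y :: ys).eraseIdx pre.length = pre ++ ys := by
  induction pre with
  | nil => simp
  | cons a t ih => simp [List.eraseIdx_cons_succ, ih]

theorem headD_len (kept : List (List String)) (r : List String)
    (rest : List (List String)) (w : Nat)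
    (hk : ∀ x ∈ kept, x.length = w) (hr : r.length = w) :
    ((kept ++ r :: rest).headD []).length = w := by
  cases kept with
  | nil => simpa using hr
  | cons a t => exact hk a (by simp)

theorem rowStep_eq (kept : List (List String)) (r : List String)
    (rest : List (List String)) (w : Nat)
    (hk : ∀ x ∈ kept, x.length = w) (hr : r.length = w) :
    rowStepA (kept ++ r :: rest, (kept.length : Int), (kept ++ r :: rest).length)
      = if keepR r then
          (kept ++ r :: rest, ((kept.length : Int) + 1), (kept ++ r :: rest).length)
        else
          (kept ++ rest, (kept.length : Int), (kept ++ rest).length) := by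
  have hhead := headD_len kept r rest w hk hr
  have hget : (PySem.List.pyGet? (kept ++ r :: rest) (kept.length : Int)).getD [] = r := by
    rw [PySem.List.pyGet?_append_length]; rfl
  have hpop : ((PySem.List.pop? (kept ++ r :: rest) (kept.length : Int)).map Prod.snd).getD
      (kept ++ r :: rest) = kept ++ rest := by
    have hlt : kept.length < (kept ++ r :: rest).length := by simp
    rw [PySem.List.pop?_natCast _ _ hlt]
    simp [eraseIdx_append_self]
  by_cases hkr : keepR r = true
  · have hne : ¬ r = List.replicate w "." := by
      intro h; rw [eq_replicate_iff_not_keepR r w hr] at h; simp [h] at hkr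
    simp only [rowStepA, chaorowA, hhead, hget, range_map_const, if_neg hne, hkr, if_pos]
    simp
  · have heq : r = List.replicate w "." := by
      rw [eq_replicate_iff_not_keepR r w hr]; simpa using hkr
    simp only [rowStepA, chaorowA, hhead, hget, range_map_const, if_pos heq, hpop]
    have hlen : (kept ++ rest).length ≠ (kept ++ r :: rest).length := by simp
    simp only [Bool.not_eq_true] at hkr
    simp [hkr]

theorem row_iter (w : Nat) (rest : List (List String)) :
    ∀ (kept : List (List String)),
      (∀ x ∈ kept, x.length = w) →
      (∀ x ∈ rest, x.length = w) →
      rowStepA^[rest.length] (kept ++ rest, (kept.length : Int), (kept ++ rest).length)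
        = (kept ++ rest.filter keepR, ((kept ++ rest.filter keepR).length : Int),
           (kept ++ rest.filter keepR).length) := by
  induction rest with
  | nil => intro kept _ _; simp
  | cons r rest' ih =>
    intro kept hk hrest
    have hr : r.length = w := hrest r (by simp)
    have hrest' : ∀ x ∈ rest', x.length = w := fun x hx => hrest x (by simp [hx])
    rw [List.length_cons, Function.iterate_succ_apply, rowStep_eq kept r rest' w hk hr]
    by_cases hkr : keepR r = true
    · rw [if_pos hkr]
      have h1 : kept ++ r :: rest' = (kept ++ [r]) ++ rest' := by simp
      have h2 : ((kept.length : Int) + 1) = (((kept ++ [r]).length : Nat) : Int) := by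
        simp
      rw [h1, h2, ih (kept ++ [r]) (by
        intro x hx
        rcases List.mem_append.mp hx with h | h
        · exact hk x h
        · simp at h; subst h; exact hr) hrest']
      simp [hkr]
    · rw [if_neg hkr]
      rw [ih kept hk hrest']
      have : keepR r = false := by simpa using hkr
      simp [this]

theorem selPrefix_succ (g : List (List String)) (j : Nat) :
    selPrefix g (j + 1) =
      if keepC g j then selPrefix g j ++ [j] else selPrefix g j := by
  by_cases h : keepC g j <;>
    simp [selPrefix, List.range_succ, List.filter_append, h]

theorem index_sel (r : List String) (j : Nat) (pre : List String) (hj : j < r.length) :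
    (PySem.List.pyGet? (pre ++ r.drop j) (pre.length : Int)).getD "" = r.getD j "" := by
  rw [List.drop_eq_getElem_cons hj, PySem.List.pyGet?_append_length,
      List.getD_eq_getElem r "" hj]
  rfl

theorem pop_sel (r : List String) (j : Nat) (pre : List String) (hj : j < r.length) :
    ((PySem.List.pop? (pre ++ r.drop j) (pre.length : Int)).map Prod.snd).getD
        (pre ++ r.drop j) = pre ++ r.drop (j + 1) := by
  rw [List.drop_eq_getElem_cons hj]
  have hlt : pre.length < (pre ++ r[j]'hj :: r.drop (j + 1)).length := by
    simp only [List.length_append, List.length_cons]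
    omega
  rw [PySem.List.pop?_natCast _ _ hlt]
  simp only [Option.map_some, Option.getD_some]
  rw [eraseIdx_append_self]

theorem keepC_false_iff (g : List (List String)) (j : Nat) :
    keepC g j = false ↔ ∀ r ∈ g, r.getD j "" = "." := by
  simp [keepC]

theorem curGrid_succ_keep (g : List (List String)) (w j : Nat)
    (hw : ∀ r ∈ g, r.length = w) (hj : j < w) (hc : keepC g j = true) :
    curGrid g j = curGrid g (j + 1) := by
  unfold curGrid
  apply List.map_congr_left
  intro r hr
  have hjr : j < r.length := by rw [hw r hr]; exact hj
  rw [selPrefix_succ, if_pos hc, List.map_append, List.append_assoc]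
  congr 1
  rw [List.map_singleton, List.singleton_append, List.getD_eq_getElem r "" hjr,
      ← List.drop_eq_getElem_cons hjr]

theorem thecolum_eq (g : List (List String)) (w j : Nat)
    (hw : ∀ r ∈ g, r.length = w) (hj : j < w) :
    (curGrid g j).map (fun fila =>
        (PySem.List.pyGet? fila ((selPrefix g j).length : Int)).getD "")
      = g.map (fun r => r.getD j "") := by
  unfold curGrid
  rw [List.map_map]
  apply List.map_congr_left
  intro r hr
  have hjr : j < r.length := by rw [hw r hr]; exact hj
  have h1 : ((selPrefix g j).map (fun c => r.getD c "")).length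
      = (selPrefix g j).length := List.length_map _
  simp only [Function.comp_apply]
  rw [← h1, index_sel r j _ hjr]

theorem byecolum_curGrid (g : List (List String)) (w j : Nat)
    (hw : ∀ r ∈ g, r.length = w) (hj : j < w) :
    byecolumA (curGrid g j) ((selPrefix g j).length : Int) = curGrid g (j + 1) := by
  simp only [byecolumA]
  rw [thecolum_eq g w j hw hj, range_map_const]
  have hlen : (curGrid g j).length = g.length := by
    unfold curGrid; exact List.length_map _
  rw [hlen]
  by_cases hc : keepC g j
  · rw [if_neg, curGrid_succ_keep g w j hw hj hc]
    intro h
    rw [map_eq_replicate_iff] at h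
    rw [← Bool.not_eq_false, keepC_false_iff] at hc
    exact hc h
  · rw [if_pos]
    · unfold curGrid
      rw [List.map_map]
      apply List.map_congr_left
      intro r hr
      have hjr : j < r.length := by rw [hw r hr]; exact hj
      have h1 : ((selPrefix g j).map (fun c => r.getD c "")).length
          = (selPrefix g j).length := List.length_map _
      simp only [Function.comp_apply]
      rw [← h1, pop_sel r j _ hjr, selPrefix_succ, if_neg hc]
    · rw [map_eq_replicate_iff]
      rw [Bool.not_eq_true, keepC_false_iff] at hc
      exact hc

theorem curGrid_headD_len (g : List (List String)) (w j : Nat) (hg : g ≠ [])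
    (hw : ∀ r ∈ g, r.length = w) (_hj : j ≤ w) :
    ((curGrid g j).headD []).length = (selPrefix g j).length + (w - j) := by
  obtain ⟨r0, g', rfl⟩ := List.exists_cons_of_ne_nil hg
  have hw0 : r0.length = w := hw r0 (by simp)
  simp [curGrid, hw0]

theorem length_selPrefix_succ (g : List (List String)) (j : Nat) :
    (selPrefix g (j + 1)).length
      = if keepC g j then (selPrefix g j).length + 1 else (selPrefix g j).length := by
  rw [selPrefix_succ]
  by_cases hc : keepC g j <;> simp [hc]

theorem colStep_eq (g : List (List String)) (w j : Nat) (hg : g ≠ [])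
    (hw : ∀ r ∈ g, r.length = w) (hj : j < w) :
    colStepA (curGrid g j, ((selPrefix g j).length : Int),
              (selPrefix g j).length + (w - j))
      = (curGrid g (j + 1), ((selPrefix g (j + 1)).length : Int),
         (selPrefix g (j + 1)).length + (w - (j + 1))) := by
  simp only [colStepA]
  rw [byecolum_curGrid g w j hw hj,
      curGrid_headD_len g w (j + 1) hg hw (by omega)]
  rw [length_selPrefix_succ]
  by_cases hc : keepC g j
  · rw [if_pos hc]
    have : (selPrefix g j).length + 1 + (w - (j + 1))
        = (selPrefix g j).length + (w - j) := by omega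
    rw [this, if_neg (by omega)]
    push_cast
    ring_nf
  · rw [if_neg hc]
    have hne : (selPrefix g j).length + (w - j)
        ≠ (selPrefix g j).length + (w - (j + 1)) := by omega
    rw [if_pos hne]
    ring_nf

theorem col_iter (g : List (List String)) (w : Nat) (hg : g ≠ [])
    (hw : ∀ r ∈ g, r.length = w) :
    ∀ (k j : Nat), j + k = w →
      colStepA^[k] (curGrid g j, ((selPrefix g j).length : Int),
                    (selPrefix g j).length + k)
        = (curGrid g w, ((selPrefix g w).length : Int), (selPrefix g w).length) := by
  intro k
  induction k with
  | zero => intro j hj; simp [hj.symm]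
  | succ k ih =>
    intro j hj
    have hjw : j < w := by omega
    rw [Function.iterate_succ_apply]
    have ha : (selPrefix g j).length + (k + 1) = (selPrefix g j).length + (w - j) := by omega
    rw [ha, colStep_eq g w j hg hw hjw]
    have ha2 : (selPrefix g (j + 1)).length + (w - (j + 1))
        = (selPrefix g (j + 1)).length + k := by omega
    rw [ha2]
    exact ih (j + 1) (by omega)

theorem selPrefix_zero (g : List (List String)) : selPrefix g 0 = [] := by
  simp [selPrefix]

theorem curGrid_zero (g : List (List String)) : curGrid g 0 = g := by
  simp [curGrid, selPrefix_zero]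

theorem curGrid_last (g : List (List String)) (w : Nat)
    (hw : ∀ r ∈ g, r.length = w) :
    curGrid g w = g.map (fun r => (selPrefix g w).map (fun c => r.getD c "")) := by
  unfold curGrid
  apply List.map_congr_left
  intro r hr
  rw [List.drop_of_length_le (by rw [hw r hr]), List.append_nil]

theorem main_eq (m : List (List String))
    (hrect : ∀ r ∈ m, r.length = (m.headD []).length)
    (hex : ∃ r ∈ m, ∃ c ∈ r, c ≠ ".") :
    byebyelines m = byebyelines_alt m := by
  obtain ⟨r0, hr0, c0, hc0, hne⟩ := hex
  simp only [byebyelines, byebyelines_alt]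
  have hkr0 : keepR r0 = true := by simp [keepR]; exact ⟨c0, hc0, hne⟩
  have hg0 : r0 ∈ m.filter keepR := List.mem_filter.mpr ⟨hr0, hkr0⟩
  have hg : m.filter keepR ≠ [] := List.ne_nil_of_mem hg0
  have hwg : ∀ r ∈ m.filter keepR, r.length = (m.headD []).length :=
    fun r hr => hrect r (List.mem_of_mem_filter hr)
  -- row phase
  have hrow := row_iter ((m.headD []).length) m [] (by simp) hrect
  simp only [List.nil_append, List.length_nil, Nat.cast_zero] at hrow
  rw [foldl_const_iterate (List.range m.length) rowStepA, List.length_range, hrow]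
  -- head of the filtered grid has length w
  have hhead : ((m.filter keepR).headD []).length = (m.headD []).length := by
    obtain ⟨h0, t0, hcons⟩ := List.exists_cons_of_ne_nil hg
    rw [hcons]
    exact hwg h0 (by rw [hcons]; simp)
  -- column phase
  have hcol := col_iter (m.filter keepR) ((m.headD []).length) hg hwg
      ((m.headD []).length) 0 (by omega)
  simp only [selPrefix_zero, curGrid_zero, List.length_nil, Nat.cast_zero,
    Nat.zero_add] at hcol
  simp only []
  rw [foldl_const_iterate _ colStepA, List.length_range, hhead, hcol]
  rw [curGrid_last _ _ hwg]
  have e1 : (fun r : List String => r.any fun c => c != ".") = keepR := rfl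
  rw [e1, hhead]
  rfl

-- ===== VERDICT (by name: the statement is the Claim_ definition above) =====
theorem byebyelines_spec : Claim_equal_byebyelines := by
  intro m _ hpre
  unfold Spec_byebyelines
  exact main_eq m hpre.1 hpre.2
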